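-- pv_equiv track=rewrite | github.com/pypi-data/pypi-mirror-309 | packages/lingpatlab/lingpatlab-0.2.13.tar.gz/lingpatlab-0.2.13/lingpatlab/tokenizer/svc/tokenize_use_graffl.py | _redelimit_spaces
-- ===== SOURCE A (Python) =====
-- from typing import Optional, List
--
-- def _redelimit_spaces(
--                       tokens: list) -> list:
--     """Rejoin orphaned spaces with owning text
--
--     Sample Input:
--         ["health's ", 'management', ',', ' ', 'NPs']
--
--     Sample Output
--         ["health's ", 'management', ', ', 'NPs']
--
--     Args:
--         tokens (list): a list of tokens
--
--     Returns:
--         list: a normalized list of tokens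
--     """
--     normalized = []
--
--     i = 0
--     while i < len(tokens):
--
--         def next_token() -> Optional[str]:
--             if i + 1 < len(tokens):
--                 return tokens[i + 1]
--
--         t_curr = tokens[i]
--         t_next = next_token()
--
--         if t_next and t_next == ' ':
--             normalized.append(f'{t_curr} ')
--             i += 1
--         else:
--             normalized.append(t_curr)
--
--         i += 1
--
--     return normalized
-- ===== SOURCE B (Python) =====
-- def _redelimit_spaces(tokens: list) -> list:
--     """Rejoin orphaned spaces with owning text (look-behind single pass)."""
--     result = []
--     just_merged = False
--     for t in tokens:
--         if t == ' ' and result and not just_merged: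
--             result[-1] = f'{result[-1]} '
--             just_merged = True
--         else:
--             result.append(t)
--             just_merged = False
--     return result
-- ===== Notes on version B (the rewrite author's own statement) =====
-- stated objective: simpler
-- what changed: Replaced the index-based while loop with look-ahead and index skipping by a plain for-loop over the tokens that merges an orphan space into the previously emitted token (look-behind), tracking a just_merged flag instead of manipulating indices.
import Mathlib
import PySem

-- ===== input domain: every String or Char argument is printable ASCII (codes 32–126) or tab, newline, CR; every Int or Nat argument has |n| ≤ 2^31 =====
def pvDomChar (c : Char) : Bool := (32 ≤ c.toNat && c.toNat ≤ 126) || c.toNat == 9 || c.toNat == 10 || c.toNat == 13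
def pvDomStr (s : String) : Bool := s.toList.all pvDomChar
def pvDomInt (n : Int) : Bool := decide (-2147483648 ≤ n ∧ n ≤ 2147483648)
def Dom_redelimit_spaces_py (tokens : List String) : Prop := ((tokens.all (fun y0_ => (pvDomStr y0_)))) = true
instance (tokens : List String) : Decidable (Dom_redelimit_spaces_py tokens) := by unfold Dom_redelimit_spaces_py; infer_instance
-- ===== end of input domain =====

-- B replaces A's index-based while loop (look-ahead + index skip) by a plain for-loop that
-- merges an orphan space into the last emitted token (look-behind with a just_merged flag): simpler.

-- ===== PORT A =====
-- the while loop: i is the index, normalized the accumulator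
def redelimitA_loop (tokens : List String) (i : Nat) (normalized : List String) : List String :=
  if h : i < tokens.length then
    let t_curr := tokens[i]
    -- next_token(): tokens[i+1] if in range else None
    let t_next : Option String := if h2 : i + 1 < tokens.length then some tokens[i+1] else none
    -- 'if t_next and t_next == " "': truthiness (non-None, non-empty) and equality
    match t_next with
    | some n =>
        if n ≠ "" ∧ n = " " then
          redelimitA_loop tokens (i + 2) (normalized ++ [t_curr ++ " "])
        else
          redelimitA_loop tokens (i + 1) (normalized ++ [t_curr])
    | none => redelimitA_loop tokens (i + 1) (normalized ++ [t_curr])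
  else normalized
termination_by tokens.length - i
decreasing_by all_goals omega

def redelimit_spaces_py (tokens : List String) : List String :=
  redelimitA_loop tokens 0 []

-- ===== PORT B =====
-- one for-loop step: state is (result, just_merged)
def redelimitB_step (st : List String × Bool) (t : String) : List String × Bool :=
  if t = " " ∧ st.1 ≠ [] ∧ st.2 = false then
    (st.1.dropLast ++ [st.1.getLast! ++ " "], true)
  else
    (st.1 ++ [t], false)

def redelimit_spaces_py_alt (tokens : List String) : List String :=
  (tokens.foldl redelimitB_step ([], false)).1

-- ===== PRECONDITION & SPEC =====
def Spec_redelimit_spaces_py (tokens : List String) (out : List String) : Prop := out = redelimit_spaces_py_alt tokens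
instance (tokens : List String) (out : List String) : Decidable (Spec_redelimit_spaces_py tokens out) := by unfold Spec_redelimit_spaces_py; infer_instance

-- ===== CLAIM (what is proved, stated in full; the proofs are below) =====
def Claim_equal_redelimit_spaces_py : Prop := ∀ (tokens : List String), Dom_redelimit_spaces_py tokens → Spec_redelimit_spaces_py tokens (redelimit_spaces_py tokens)

-- ===== LEMMAS AND PROOFS =====

-- common reference function: structural recursion pairing a token with a following " "
def redelimitF : List String → List String
  | [] => []
  | [x] => [x]
  | x :: y :: rest => if y = " " then (x ++ " ") :: redelimitF rest else x :: redelimitF (y :: rest)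

-- A's loop, characterised: it computes redelimitF of the remaining suffix
theorem redelimitA_loop_eq (tokens : List String) : ∀ (n i : Nat), tokens.length - i ≤ n →
    ∀ acc : List String, redelimitA_loop tokens i acc = acc ++ redelimitF (tokens.drop i) := by
  intro n
  induction n with
  | zero =>
    intro i hi acc
    rw [redelimitA_loop]
    have hge : tokens.length ≤ i := by omega
    simp [Nat.not_lt.mpr hge, List.drop_of_length_le hge, redelimitF]
  | succ n ih =>
    intro i hi acc
    rw [redelimitA_loop]
    by_cases h : i < tokens.length
    · simp only [h, dif_pos]
      have hdrop : tokens.drop i = tokens[i] :: tokens.drop (i + 1) :=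
        List.drop_eq_getElem_cons h
      by_cases h2 : i + 1 < tokens.length
      · have hdrop2 : tokens.drop (i + 1) = tokens[i + 1] :: tokens.drop (i + 2) :=
          List.drop_eq_getElem_cons h2
        simp only [h2, dif_pos]
        by_cases hsp : tokens[i + 1] = " "
        · have hne : tokens[i + 1] ≠ "" := by rw [hsp]; decide
          simp only [hsp, ne_eq]
          rw [ih (i + 2) (by omega), hdrop, hdrop2, hsp]
          simp [redelimitF]
        · have : ¬ (tokens[i + 1] ≠ "" ∧ tokens[i + 1] = " ") := by
            intro hc; exact hsp hc.2
          simp only [this]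
          rw [ih (i + 1) (by omega), hdrop, hdrop2]
          simp [redelimitF, hsp]
      · simp only [h2]
        rw [ih (i + 1) (by omega), hdrop,
          List.drop_of_length_le (by omega : tokens.length ≤ i + 1)]
        simp [redelimitF]
    · have hge : tokens.length ≤ i := by omega
      simp [h, List.drop_of_length_le hge, redelimitF]

-- the merging step of B, computed
theorem redelimitB_step_merge (acc : List String) (t : String) :
    redelimitB_step (acc ++ [t], false) " " = (acc ++ [t ++ " "], true) := by
  simp [redelimitB_step, List.getLast!_eq_getLast?_getD]

-- the appending step of B (flag true, or token not a space, or empty result)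
theorem redelimitB_step_append (st : List String × Bool) (t : String)
    (h : ¬ (t = " " ∧ st.1 ≠ [] ∧ st.2 = false)) :
    redelimitB_step st t = (st.1 ++ [t], false) := by
  simp [redelimitB_step, h]

-- B's fold after a token t has just been appended (flag false)
theorem redelimitB_aux : ∀ (n : Nat) (rest : List String), rest.length ≤ n →
    ∀ (acc : List String) (t : String),
      (rest.foldl redelimitB_step (acc ++ [t], false)).1 = acc ++ redelimitF (t :: rest) := by
  intro n
  induction n with
  | zero =>
    intro rest hr acc t
    have : rest = [] := List.length_eq_zero_iff.mp (by omega)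
    subst this
    simp [redelimitF]
  | succ n ih =>
    intro rest hr acc t
    match rest with
    | [] => simp [redelimitF]
    | y :: rest2 =>
      by_cases hy : y = " "
      · subst hy
        rw [List.foldl_cons, redelimitB_step_merge]
        match rest2 with
        | [] => simp [redelimitF]
        | u :: rest3 =>
          rw [List.foldl_cons,
            redelimitB_step_append (acc ++ [t ++ " "], true) u (by simp)]
          rw [ih rest3 (by simp at hr; omega) (acc ++ [t ++ " "]) u]
          simp [redelimitF]
      · rw [List.foldl_cons,
          redelimitB_step_append (acc ++ [t], false) y (by simp [hy])]
        rw [show acc ++ [t] ++ [y] = (acc ++ [t]) ++ [y] from rfl]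
        rw [ih rest2 (by simp at hr; omega) (acc ++ [t]) y]
        simp [redelimitF, hy]

-- ===== VERDICT (by name: the statement is the Claim_ definition above) =====
theorem redelimit_spaces_py_spec : Claim_equal_redelimit_spaces_py := by
  intro tokens _
  unfold Spec_redelimit_spaces_py redelimit_spaces_py redelimit_spaces_py_alt
  rw [redelimitA_loop_eq tokens tokens.length 0 (by omega)]
  simp only [List.drop_zero, List.nil_append]
  match tokens with
  | [] => simp [redelimitF]
  | t :: rest =>
    rw [List.foldl_cons, redelimitB_step_append ([], false) t (by simp)]
    rw [show ([] : List String) ++ [t] = [] ++ [t] from rfl]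
    rw [redelimitB_aux rest.length rest le_rfl [] t]
    simp
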